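-- pv_equiv track=rewrite | github.com/Epherum/jobformer | src/jobscraper/transfer_today.py | _range_width
-- ===== SOURCE A (Python) =====
-- def _range_width(range_cols: str) -> int:
--     _, end = range_cols.split(":", 1)
--     end = end.strip().upper()
--     width = 0
--     for ch in end:
--         if not ("A" <= ch <= "Z"):
--             continue
--         width = width * 26 + (ord(ch) - ord("A") + 1)
--     if width <= 0:
--         raise ValueError(f"Unsupported range_cols: {range_cols}")
--     return width
-- ===== SOURCE B (Python) =====
-- def _range_width(range_cols: str) -> int:
--     _, end = range_cols.split(":", 1)
--     letters = [c for c in end.strip().upper() if "A" <= c <= "Z"]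
--     width = sum((ord(c) - ord("A") + 1) * 26 ** i
--                 for i, c in enumerate(reversed(letters)))
--     if width <= 0:
--         raise ValueError(f"Unsupported range_cols: {range_cols}")
--     return width
-- ===== Notes on version B (the rewrite author's own statement) =====
-- stated objective: alternative
-- what changed: Replaces the left-to-right Horner accumulator with skip-branch by first extracting the letter list and then summing explicit place values (ord(c)-ord('A')+1)*26**i over the reversed letter list.
-- outside the precondition, e.g. on _range_width('A'): A raises ValueError, B raises ValueError; on _range_width(':'): A raises ValueError, B raises ValueError
import Mathlib
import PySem

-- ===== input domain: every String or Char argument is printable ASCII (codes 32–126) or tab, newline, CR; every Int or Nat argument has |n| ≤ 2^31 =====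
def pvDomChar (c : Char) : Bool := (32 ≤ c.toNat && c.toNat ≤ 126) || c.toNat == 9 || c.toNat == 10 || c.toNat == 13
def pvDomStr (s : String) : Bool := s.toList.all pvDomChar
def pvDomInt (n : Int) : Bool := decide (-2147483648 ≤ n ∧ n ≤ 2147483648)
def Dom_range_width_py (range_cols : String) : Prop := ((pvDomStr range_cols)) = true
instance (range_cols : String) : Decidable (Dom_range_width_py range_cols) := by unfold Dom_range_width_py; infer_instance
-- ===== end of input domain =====

-- B replaces A's left-to-right Horner accumulator (skipping non-letters in the loop)
-- with letter extraction followed by an explicit place-value sum over the reversed letters.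

-- ===== PORT A =====
-- literal transliteration of A; on A's raise paths (no ':' to unpack, or width <= 0,
-- both excluded by Pre_) the port returns 0
def range_width_py (range_cols : String) : Int :=
  match PySem.Chars.splitMax? range_cols.toList ":".toList 1 with
  | some [_, e] =>
      let endU := PySem.Chars.upper (PySem.Chars.strip e)
      let width := endU.foldl
        (fun w ch => if 'A' ≤ ch ∧ ch ≤ 'Z' then w * 26 + ((ch.toNat : Int) - 65 + 1) else w) 0
      if width ≤ 0 then 0 else width
  | _ => 0

-- ===== PORT B =====
def range_width_py_alt (range_cols : String) : Int :=
  let parts := (PySem.Chars.splitMax? range_cols.toList ":".toList 1).getD []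
  if parts.length = 2 then
    let letters := (PySem.Chars.upper (PySem.Chars.strip (parts.getD 1 []))).filter
      (fun c => decide ('A' ≤ c ∧ c ≤ 'Z'))
    let width := ((PySem.List.enumerate letters.reverse).map
      (fun p => ((p.2.toNat : Int) - 65 + 1) * 26 ^ p.1.toNat)).sum
    if width ≤ 0 then 0 else width
  else 0

-- ===== PRECONDITION & SPEC =====
-- Pre_ excludes exactly the inputs on which A raises ValueError: strings without ':'
-- (the unpacking fails) and strings whose part after the first ':' has no letter (width <= 0).
def Pre_range_width_py (range_cols : String) : Prop :=
  ':' ∈ range_cols.toList ∧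
  ((range_cols.toList.dropWhile (· ≠ ':')).drop 1).any
    (fun c => ('A' ≤ c ∧ c ≤ 'Z') ∨ ('a' ≤ c ∧ c ≤ 'z')) = true
instance (range_cols : String) : Decidable (Pre_range_width_py range_cols) := by
  unfold Pre_range_width_py; infer_instance
def pvWitness_range_width_py : String := "A1:C3"

def Spec_range_width_py (range_cols : String) (out : Int) : Prop := out = range_width_py_alt range_cols
instance (range_cols : String) (out : Int) : Decidable (Spec_range_width_py range_cols out) := by unfold Spec_range_width_py; infer_instance

-- ===== CLAIM (what is proved, stated in full; the proofs are below) =====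
def Claim_equal_range_width_py : Prop := ∀ (range_cols : String), Dom_range_width_py range_cols → Pre_range_width_py range_cols → Spec_range_width_py range_cols (range_width_py range_cols)

-- ===== LEMMAS AND PROOFS =====

-- A's loop ignores non-letters: folding over the whole string equals folding over its letters.
theorem horner_filter (l : List Char) (a : Int) :
    l.foldl (fun w ch => if 'A' ≤ ch ∧ ch ≤ 'Z' then w * 26 + ((ch.toNat : Int) - 65 + 1) else w) a
      = (l.filter (fun c => decide ('A' ≤ c ∧ c ≤ 'Z'))).foldl
          (fun w ch => w * 26 + ((ch.toNat : Int) - 65 + 1)) a := by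
  induction l generalizing a with
  | nil => rfl
  | cons x t ih =>
      by_cases h : 'A' ≤ x ∧ x ≤ 'Z' <;> simp [List.foldl, h, ih]

-- Horner evaluation equals the place-value sum over the reversed enumerated list.
theorem horner_place_value (l : List Char) (a : Int) :
    l.foldl (fun w ch => w * 26 + ((ch.toNat : Int) - 65 + 1)) a
      = a * 26 ^ l.length +
        ((PySem.List.enumerate l.reverse).map
          (fun p => ((p.2.toNat : Int) - 65 + 1) * 26 ^ p.1.toNat)).sum := by
  induction l generalizing a with
  | nil => simp [PySem.List.enumerate_nil]
  | cons x t ih =>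
      simp only [List.foldl, List.reverse_cons, List.length_cons]
      rw [ih, PySem.List.enumerate_append]
      simp [PySem.List.enumerate_cons, PySem.List.enumerate_nil, List.length_reverse]
      ring

theorem range_width_eq (range_cols : String) :
    range_width_py range_cols = range_width_py_alt range_cols := by
  unfold range_width_py range_width_py_alt
  cases h : PySem.Chars.splitMax? range_cols.toList ":".toList 1 with
  | none => rfl
  | some parts =>
      match parts with
      | [] => rfl
      | [_] => rfl
      | _ :: _ :: _ :: _ => simp
      | [p, e] =>
          simp only [Option.getD_some, List.length_cons, List.length_nil,
            List.getD, List.getElem?_cons_succ, List.getElem?_cons_zero]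
          rw [horner_filter, horner_place_value]
          simp

-- ===== VERDICT (by name: the statement is the Claim_ definition above) =====
theorem range_width_py_spec : Claim_equal_range_width_py := by
  intro s _ _
  unfold Spec_range_width_py
  exact range_width_eq s
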